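-- pv_equiv track=rewrite | github.com/ninjra/statistics_harness | plugins/analysis_close_cycle_duration_shift/plugin.py | _pick_column
-- ===== SOURCE A (Python) =====
-- def _pick_column(
--     preferred: str | None,
--     columns: list[str],
--     role_by_name: dict[str, str],
--     roles: set[str],
--     patterns: list[str],
--     lower_names: dict[str, str],
--     exclude: set[str],
-- ) -> str | None:
--     if preferred and preferred in columns:
--         return preferred
--     for col in columns:
--         if col in exclude:
--             continue
--         if role_by_name.get(col) in roles:
--             return col
--     for col in columns:
--         if col in exclude:
--             continue
--         name = lower_names[col]
--         if any(pattern in name for pattern in patterns):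
--             return col
--     return None
-- ===== SOURCE B (Python) =====
-- def _pick_column(
--     preferred,
--     columns,
--     role_by_name,
--     roles,
--     patterns,
--     lower_names,
--     exclude,
-- ):
--     if preferred and preferred in columns:
--         return preferred
--     best = None  # (tier, col): tier 0 = role match, tier 1 = pattern match
--     for col in columns:
--         if col in exclude:
--             continue
--         if role_by_name.get(col) in roles:
--             tier = 0
--         else:
--             name = lower_names.get(col)
--             if name is None or not any(p in name for p in patterns):
--                 continue
--             tier = 1
--         if best is None or tier < best[0]:
--             best = (tier, col)
--     return None if best is None else best[1]
-- ===== Notes on version B (the rewrite author's own statement) =====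
-- stated objective: alternative
-- what changed: B replaces A's two sequential early-return scans with one full fold over the columns that maintains the best candidate by tier (0 = role match, 1 = pattern match), keeping the first column of the lowest tier, and returns it after the pass.
import Mathlib
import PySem

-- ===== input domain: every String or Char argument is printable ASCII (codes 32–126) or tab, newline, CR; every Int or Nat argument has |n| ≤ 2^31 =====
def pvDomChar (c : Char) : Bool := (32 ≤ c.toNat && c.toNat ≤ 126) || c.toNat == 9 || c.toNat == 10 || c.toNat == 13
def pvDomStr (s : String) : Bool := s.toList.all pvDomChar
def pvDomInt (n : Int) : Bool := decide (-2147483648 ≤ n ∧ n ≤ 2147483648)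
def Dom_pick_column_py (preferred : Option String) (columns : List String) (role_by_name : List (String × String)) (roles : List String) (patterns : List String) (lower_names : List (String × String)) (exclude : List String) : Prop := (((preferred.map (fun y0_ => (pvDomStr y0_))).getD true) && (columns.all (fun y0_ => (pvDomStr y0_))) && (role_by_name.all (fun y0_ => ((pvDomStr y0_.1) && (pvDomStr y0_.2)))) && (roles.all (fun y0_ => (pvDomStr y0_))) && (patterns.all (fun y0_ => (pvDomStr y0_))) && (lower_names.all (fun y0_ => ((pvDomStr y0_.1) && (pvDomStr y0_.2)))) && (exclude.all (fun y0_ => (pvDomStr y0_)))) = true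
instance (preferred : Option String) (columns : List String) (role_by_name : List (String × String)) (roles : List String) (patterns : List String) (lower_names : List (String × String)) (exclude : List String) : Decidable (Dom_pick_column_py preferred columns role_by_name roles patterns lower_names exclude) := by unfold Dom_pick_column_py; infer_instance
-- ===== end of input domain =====

-- ===== PORT A =====
-- B replaces A's two sequential early-return scans with one full fold keeping the best candidate by tier (alternative decomposition, same cost).
-- Dicts are association lists; lookup = first match (List.lookup); sets are lists of distinct elements, membership = contains.

-- A's first loop: first non-excluded column whose role is in roles
def pickA_role (columns : List String) (role_by_name : List (String × String)) (roles : List String) (exclude : List String) : Option String :=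
  match columns with
  | [] => none
  | c :: rest =>
    if exclude.contains c then pickA_role rest role_by_name roles exclude
    else if (match List.lookup c role_by_name with | some r => roles.contains r | none => false) then some c
    else pickA_role rest role_by_name roles exclude

-- A's second loop; Python raises KeyError where the lookup is none (returns none here, excluded by Pre_)
def pickA_pat (columns : List String) (patterns : List String) (lower_names : List (String × String)) (exclude : List String) : Option String :=
  match columns with
  | [] => none
  | c :: rest =>
    if exclude.contains c then pickA_pat rest patterns lower_names exclude
    else match List.lookup c lower_names with
      | none => none
      | some name => if patterns.any (fun p => PySem.Str.isIn p name) then some c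
        else pickA_pat rest patterns lower_names exclude

def pick_column_py (preferred : Option String) (columns : List String) (role_by_name : List (String × String)) (roles : List String) (patterns : List String) (lower_names : List (String × String)) (exclude : List String) : Option String :=
  if (match preferred with | some p => !(p == "") && columns.contains p | none => false) then preferred
  else match pickA_role columns role_by_name roles exclude with
    | some c => some c
    | none => pickA_pat columns patterns lower_names exclude

-- ===== PORT B =====
-- B's loop body: skip excluded columns, compute the column's tier (0 role match, 1 pattern
-- match, none otherwise), and keep the incumbent unless the new tier is strictly smaller.
def pickB_step (role_by_name : List (String × String)) (roles : List String) (patterns : List String) (lower_names : List (String × String)) (exclude : List String) (best : Option (Int × String)) (col : String) : Option (Int × String) :=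
  if exclude.contains col then best
  else
    match (if (match List.lookup col role_by_name with | some r => roles.contains r | none => false) then some (0 : Int)
           else match List.lookup col lower_names with
             | none => none
             | some name => if patterns.any (fun p => PySem.Str.isIn p name) then some 1 else none) with
    | none => best
    | some t => if (match best with | none => true | some b => t < b.1) then some (t, col) else best

def pick_column_py_alt (preferred : Option String) (columns : List String) (role_by_name : List (String × String)) (roles : List String) (patterns : List String) (lower_names : List (String × String)) (exclude : List String) : Option String :=
  if (match preferred with | some p => !(p == "") && columns.contains p | none => false) then preferred
  else match columns.foldl (pickB_step role_by_name roles patterns lower_names exclude) none with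
    | none => none
    | some b => some b.2

-- ===== PRECONDITION & SPEC =====
-- helper predicates on a single column (used by Pre_ only)
def pvRoleHit (role_by_name : List (String × String)) (roles : List String) (c : String) : Bool :=
  match List.lookup c role_by_name with | some r => roles.contains r | none => false

-- "bad" = the column at which A's second loop stops: key missing (KeyError) or pattern match
def pvBadCol (patterns : List String) (lower_names : List (String × String)) (c : String) : Bool :=
  match List.lookup c lower_names with
  | none => true
  | some name => patterns.any (fun p => PySem.Str.isIn p name)

-- Pre_ = exactly the inputs where A returns: preferred shortcut, or a role match, or the
-- first non-excluded column that would stop A's second loop is present in lower_names (no KeyError).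
def Pre_pick_column_py (preferred : Option String) (columns : List String) (role_by_name : List (String × String)) (roles : List String) (patterns : List String) (lower_names : List (String × String)) (exclude : List String) : Prop :=
  (match preferred with | some p => !(p == "") && columns.contains p | none => false) = true
  ∨ (columns.filter (fun c => !(exclude.contains c))).any (pvRoleHit role_by_name roles) = true
  ∨ (((columns.filter (fun c => !(exclude.contains c))).find? (pvBadCol patterns lower_names)).all
       (fun c => (List.lookup c lower_names).isSome)) = true
instance (preferred : Option String) (columns : List String) (role_by_name : List (String × String)) (roles : List String) (patterns : List String) (lower_names : List (String × String)) (exclude : List String) : Decidable (Pre_pick_column_py preferred columns role_by_name roles patterns lower_names exclude) := by unfold Pre_pick_column_py; infer_instance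

def pvWitness_pick_column_py : Option String × List String × (List (String × String)) × List String × List String × (List (String × String)) × List String :=
  (none, ["a"], [], [], ["a"], [("a", "a")], [])

def Spec_pick_column_py (preferred : Option String) (columns : List String) (role_by_name : List (String × String)) (roles : List String) (patterns : List String) (lower_names : List (String × String)) (exclude : List String) (out : Option String) : Prop := out = pick_column_py_alt preferred columns role_by_name roles patterns lower_names exclude
instance (preferred : Option String) (columns : List String) (role_by_name : List (String × String)) (roles : List String) (patterns : List String) (lower_names : List (String × String)) (exclude : List String) (out : Option String) : Decidable (Spec_pick_column_py preferred columns role_by_name roles patterns lower_names exclude out) := by unfold Spec_pick_column_py; infer_instance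

-- ===== CLAIM (what is proved, stated in full; the proofs are below) =====
def Claim_equal_pick_column_py : Prop := ∀ (preferred : Option String) (columns : List String) (role_by_name : List (String × String)) (roles : List String) (patterns : List String) (lower_names : List (String × String)) (exclude : List String), Dom_pick_column_py preferred columns role_by_name roles patterns lower_names exclude → Pre_pick_column_py preferred columns role_by_name roles patterns lower_names exclude → Spec_pick_column_py preferred columns role_by_name roles patterns lower_names exclude (pick_column_py preferred columns role_by_name roles patterns lower_names exclude)

-- ===== LEMMAS AND PROOFS =====

-- the column at which B's fold would record a tier-1 (pattern) candidate
def pvGoodCol (patterns : List String) (lower_names : List (String × String)) (c : String) : Bool :=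
  match List.lookup c lower_names with
  | none => false
  | some name => patterns.any (fun p => PySem.Str.isIn p name)

lemma pickA_role_eq_find (columns : List String) (role_by_name : List (String × String)) (roles : List String) (exclude : List String) :
    pickA_role columns role_by_name roles exclude
      = (columns.filter (fun c => !(exclude.contains c))).find? (pvRoleHit role_by_name roles) := by
  induction columns with
  | nil => rfl
  | cons c rest ih =>
    by_cases hx : exclude.contains c = true
    · have h2 : pickA_role (c :: rest) role_by_name roles exclude
          = pickA_role rest role_by_name roles exclude := by
        simp only [pickA_role]; rw [if_pos hx]
      have h3 : List.filter (fun x => !(exclude.contains x)) (c :: rest)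
          = List.filter (fun x => !(exclude.contains x)) rest := by
        rw [List.filter_cons, hx]; rfl
      rw [h2, h3, ih]
    · simp only [Bool.not_eq_true] at hx
      have h3 : List.filter (fun x => !(exclude.contains x)) (c :: rest)
          = c :: List.filter (fun x => !(exclude.contains x)) rest := by
        rw [List.filter_cons, hx]; rfl
      by_cases hr : pvRoleHit role_by_name roles c = true
      · have h2 : pickA_role (c :: rest) role_by_name roles exclude = some c := by
          simp only [pickA_role]
          rw [if_neg (by rw [hx]; exact Bool.false_ne_true),
            if_pos (show (match List.lookup c role_by_name with | some r => roles.contains r | none => false) = true from hr)]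
        rw [h2, h3, List.find?_cons_of_pos hr]
      · have h2 : pickA_role (c :: rest) role_by_name roles exclude
            = pickA_role rest role_by_name roles exclude := by
          simp only [pickA_role]
          rw [if_neg (by rw [hx]; exact Bool.false_ne_true),
            if_neg (show ¬ (match List.lookup c role_by_name with | some r => roles.contains r | none => false) = true from hr)]
        rw [h2, h3, List.find?_cons_of_neg hr, ih]

-- a tier-0 incumbent is never replaced
lemma pickB_fold_zero (columns : List String) (role_by_name : List (String × String)) (roles : List String) (patterns : List String) (lower_names : List (String × String)) (exclude : List String) (b : String) :
    columns.foldl (pickB_step role_by_name roles patterns lower_names exclude) (some (0, b)) = some (0, b) := by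
  induction columns with
  | nil => rfl
  | cons c rest ih =>
    have hstep : pickB_step role_by_name roles patterns lower_names exclude (some (0, b)) c = some (0, b) := by
      unfold pickB_step
      by_cases hx : exclude.contains c = true
      · rw [if_pos hx]
      · rw [if_neg hx]
        by_cases hr : (match List.lookup c role_by_name with | some r => roles.contains r | none => false) = true
        · rw [if_pos hr]; norm_num
        · rw [if_neg hr]
          cases List.lookup c lower_names with
          | none => rfl
          | some name =>
            by_cases hp : patterns.any (fun p => PySem.Str.isIn p name) = true
            · simp only [hp]; norm_num
            · simp only [Bool.not_eq_true] at hp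
              simp only [hp]; norm_num
    rw [List.foldl_cons, hstep, ih]

-- a tier-1 incumbent survives unless a role match appears later
lemma pickB_fold_one (columns : List String) (role_by_name : List (String × String)) (roles : List String) (patterns : List String) (lower_names : List (String × String)) (exclude : List String) (b : String) :
    columns.foldl (pickB_step role_by_name roles patterns lower_names exclude) (some (1, b))
      = match (columns.filter (fun c => !(exclude.contains c))).find? (pvRoleHit role_by_name roles) with
        | some c => some (0, c)
        | none => some (1, b) := by
  induction columns with
  | nil => rfl
  | cons c rest ih =>
    by_cases hx : exclude.contains c = true
    · have hstep : pickB_step role_by_name roles patterns lower_names exclude (some (1, b)) c = some (1, b) := by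
        unfold pickB_step; rw [if_pos hx]
      have hf : List.filter (fun x => !(exclude.contains x)) (c :: rest)
          = List.filter (fun x => !(exclude.contains x)) rest := by
        rw [List.filter_cons, hx]; rfl
      rw [List.foldl_cons, hstep, hf, ih]
    · simp only [Bool.not_eq_true] at hx
      have hf : List.filter (fun x => !(exclude.contains x)) (c :: rest)
          = c :: List.filter (fun x => !(exclude.contains x)) rest := by
        rw [List.filter_cons, hx]; rfl
      by_cases hr : pvRoleHit role_by_name roles c = true
      · have hstep : pickB_step role_by_name roles patterns lower_names exclude (some (1, b)) c = some (0, c) := by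
          unfold pickB_step
          rw [if_neg (by rw [hx]; exact Bool.false_ne_true),
            if_pos (show (match List.lookup c role_by_name with | some r => roles.contains r | none => false) = true from hr)]
          norm_num
        rw [List.foldl_cons, hstep, pickB_fold_zero, hf, List.find?_cons_of_pos hr]
      · have hstep : pickB_step role_by_name roles patterns lower_names exclude (some (1, b)) c = some (1, b) := by
          unfold pickB_step
          rw [if_neg (by rw [hx]; exact Bool.false_ne_true),
            if_neg (show ¬ (match List.lookup c role_by_name with | some r => roles.contains r | none => false) = true from hr)]
          cases List.lookup c lower_names with
          | none => rfl
          | some name =>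
            by_cases hp : patterns.any (fun p => PySem.Str.isIn p name) = true
            · simp only [hp]; norm_num
            · simp only [Bool.not_eq_true] at hp
              simp only [hp]; norm_num
        rw [List.foldl_cons, hstep, hf, List.find?_cons_of_neg hr, ih]

-- full characterisation of B's fold from the empty accumulator
lemma pickB_fold_none (columns : List String) (role_by_name : List (String × String)) (roles : List String) (patterns : List String) (lower_names : List (String × String)) (exclude : List String) :
    columns.foldl (pickB_step role_by_name roles patterns lower_names exclude) none
      = match (columns.filter (fun c => !(exclude.contains c))).find? (pvRoleHit role_by_name roles) with
        | some c => some (0, c)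
        | none => ((columns.filter (fun c => !(exclude.contains c))).find? (pvGoodCol patterns lower_names)).map (fun c => ((1 : Int), c)) := by
  induction columns with
  | nil => rfl
  | cons c rest ih =>
    by_cases hx : exclude.contains c = true
    · have hstep : pickB_step role_by_name roles patterns lower_names exclude none c = none := by
        unfold pickB_step; rw [if_pos hx]
      have hf : List.filter (fun x => !(exclude.contains x)) (c :: rest)
          = List.filter (fun x => !(exclude.contains x)) rest := by
        rw [List.filter_cons, hx]; rfl
      rw [List.foldl_cons, hstep, hf, ih]
    · simp only [Bool.not_eq_true] at hx
      have hf : List.filter (fun x => !(exclude.contains x)) (c :: rest)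
          = c :: List.filter (fun x => !(exclude.contains x)) rest := by
        rw [List.filter_cons, hx]; rfl
      by_cases hr : pvRoleHit role_by_name roles c = true
      · have hstep : pickB_step role_by_name roles patterns lower_names exclude none c = some (0, c) := by
          unfold pickB_step
          rw [if_neg (by rw [hx]; exact Bool.false_ne_true),
            if_pos (show (match List.lookup c role_by_name with | some r => roles.contains r | none => false) = true from hr)]
          norm_num
        rw [List.foldl_cons, hstep, pickB_fold_zero, hf, List.find?_cons_of_pos hr]
      · by_cases hg : pvGoodCol patterns lower_names c = true
        · have hstep : pickB_step role_by_name roles patterns lower_names exclude none c = some (1, c) := by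
            unfold pickB_step
            rw [if_neg (by rw [hx]; exact Bool.false_ne_true),
              if_neg (show ¬ (match List.lookup c role_by_name with | some r => roles.contains r | none => false) = true from hr)]
            unfold pvGoodCol at hg
            cases hl : List.lookup c lower_names with
            | none => rw [hl] at hg; exact absurd hg (by simp)
            | some name =>
              rw [hl] at hg
              have hg' : (patterns.any fun p => PySem.Str.isIn p name) = true := hg
              simp only [hg']; norm_num
          rw [List.foldl_cons, hstep, pickB_fold_one, hf,
            List.find?_cons_of_neg hr, List.find?_cons_of_pos hg]
          cases List.find? (pvRoleHit role_by_name roles) (List.filter (fun x => !(exclude.contains x)) rest) with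
          | none => rfl
          | some d => rfl
        · have hstep : pickB_step role_by_name roles patterns lower_names exclude none c = none := by
            unfold pickB_step
            rw [if_neg (by rw [hx]; exact Bool.false_ne_true),
              if_neg (show ¬ (match List.lookup c role_by_name with | some r => roles.contains r | none => false) = true from hr)]
            unfold pvGoodCol at hg
            cases hl : List.lookup c lower_names with
            | none => rfl
            | some name =>
              rw [hl] at hg
              simp only [Bool.not_eq_true] at hg
              have hg' : (patterns.any fun p => PySem.Str.isIn p name) = false := hg
              simp only [hg']; norm_num
          rw [List.foldl_cons, hstep, hf, List.find?_cons_of_neg hr,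
            List.find?_cons_of_neg (by simp [hg]), ih]

lemma pickA_pat_eq_find (columns : List String) (patterns : List String) (lower_names : List (String × String)) (exclude : List String)
    (hpre : (((columns.filter (fun c => !(exclude.contains c))).find? (pvBadCol patterns lower_names)).all
       (fun c => (List.lookup c lower_names).isSome)) = true) :
    pickA_pat columns patterns lower_names exclude
      = (columns.filter (fun c => !(exclude.contains c))).find? (pvGoodCol patterns lower_names) := by
  induction columns with
  | nil => rfl
  | cons c rest ih =>
    by_cases hx : exclude.contains c = true
    · have hm : c ∈ exclude := by simpa using hx
      have hf : List.filter (fun x => !(exclude.contains x)) (c :: rest)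
          = List.filter (fun x => !(exclude.contains x)) rest := by simp [hm]
      rw [hf] at hpre ⊢
      rw [show pickA_pat (c :: rest) patterns lower_names exclude
            = pickA_pat rest patterns lower_names exclude from by simp [pickA_pat, hm]]
      exact ih hpre
    · simp only [Bool.not_eq_true] at hx
      have hm : c ∉ exclude := by simpa using hx
      have hf : List.filter (fun x => !(exclude.contains x)) (c :: rest)
          = c :: List.filter (fun x => !(exclude.contains x)) rest := by simp [hm]
      rw [hf] at hpre ⊢
      have hstep : pickA_pat (c :: rest) patterns lower_names exclude
          = (match List.lookup c lower_names with
             | none => none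
             | some name => if patterns.any (fun p => PySem.Str.isIn p name) then some c
               else pickA_pat rest patterns lower_names exclude) := by
        simp only [pickA_pat, hx, Bool.false_eq_true, if_false]
      cases hl : List.lookup c lower_names with
      | none =>
        exfalso
        have hbad : pvBadCol patterns lower_names c = true := by simp [pvBadCol, hl]
        rw [List.find?_cons_of_pos hbad] at hpre
        simp [Option.all, hl] at hpre
      | some name =>
        rw [hstep, hl]
        show (if (patterns.any fun p => PySem.Str.isIn p name) = true then some c
              else pickA_pat rest patterns lower_names exclude)
            = List.find? (pvGoodCol patterns lower_names) (c :: List.filter (fun x => !(exclude.contains x)) rest)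
        by_cases hq : patterns.any (fun p => PySem.Str.isIn p name) = true
        · have hgood : pvGoodCol patterns lower_names c = true := by
            simp only [pvGoodCol, hl]; exact hq
          rw [List.find?_cons_of_pos hgood, if_pos hq]
        · simp only [Bool.not_eq_true] at hq
          have hbad : pvBadCol patterns lower_names c = false := by
            simp only [pvBadCol, hl]; exact hq
          have hgood : pvGoodCol patterns lower_names c = false := by
            simp only [pvGoodCol, hl]; exact hq
          rw [List.find?_cons_of_neg (by simp [hbad])] at hpre
          rw [List.find?_cons_of_neg (by simp [hgood]), if_neg (by rw [hq]; exact Bool.false_ne_true)]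
          exact ih hpre

lemma pick_body_eq (columns : List String) (role_by_name : List (String × String)) (roles : List String) (patterns : List String) (lower_names : List (String × String)) (exclude : List String)
    (hpre : (columns.filter (fun c => !(exclude.contains c))).any (pvRoleHit role_by_name roles) = true
      ∨ (((columns.filter (fun c => !(exclude.contains c))).find? (pvBadCol patterns lower_names)).all
           (fun c => (List.lookup c lower_names).isSome)) = true) :
    (match pickA_role columns role_by_name roles exclude with
     | some c => some c
     | none => pickA_pat columns patterns lower_names exclude)
      = (match columns.foldl (pickB_step role_by_name roles patterns lower_names exclude) none with
         | none => none
         | some b => some b.2) := by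
  rw [pickB_fold_none, pickA_role_eq_find]
  cases hrole : (columns.filter (fun c => !(exclude.contains c))).find? (pvRoleHit role_by_name roles) with
  | some c => rfl
  | none =>
    simp only []
    rcases hpre with h2 | h3
    · exfalso
      rcases List.any_eq_true.mp h2 with ⟨c, hc, hrc⟩
      exact (List.find?_eq_none.mp hrole c hc) hrc
    · rw [pickA_pat_eq_find columns patterns lower_names exclude h3]
      cases (columns.filter (fun c => !(exclude.contains c))).find? (pvGoodCol patterns lower_names) with
      | none => rfl
      | some c => rfl

-- ===== VERDICT (by name: the statement is the Claim_ definition above) =====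
theorem pick_column_py_spec : Claim_equal_pick_column_py := by
  intro preferred columns role_by_name roles patterns lower_names exclude _hdom hpre
  unfold Spec_pick_column_py pick_column_py pick_column_py_alt
  unfold Pre_pick_column_py at hpre
  cases preferred with
  | none =>
    simp only []
    rcases hpre with h1 | h2 | h3
    · exact absurd h1 (by simp)
    · exact pick_body_eq columns role_by_name roles patterns lower_names exclude (Or.inl h2)
    · exact pick_body_eq columns role_by_name roles patterns lower_names exclude (Or.inr h3)
  | some p =>
    simp only [] at hpre ⊢
    by_cases hp : (!(p == "") && columns.contains p) = true
    · rw [if_pos hp, if_pos hp]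
    · rw [if_neg hp, if_neg hp]
      rcases hpre with h1 | h2 | h3
      · exact absurd h1 hp
      · exact pick_body_eq columns role_by_name roles patterns lower_names exclude (Or.inl h2)
      · exact pick_body_eq columns role_by_name roles patterns lower_names exclude (Or.inr h3)
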